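-- pv_equiv track=rewrite | github.com/Indrikoterio/literumilo-python | literumilo/literumilo_utils.py | restore_capitals
-- ===== SOURCE A (Python) =====
-- def restore_capitals(original, analyzed):
--     """The Esperanto dictionary (vortaro) has only lower case morphemes, so words
--     are converted to lower case for dictionary lookups. It might be useful to
--     convert words back to their original case after analysis. For example, an
--     analysis of the word  'RIĈULO' will produce 'riĉ.ul.o'. This function will take
--     'RIĈULO' and 'riĉ.ul.o' to produce 'RIĈ.UL.O'.
--     Params:
--          original word
--          result of analysis
--     Return:
--          analyzed result with original case restored
--     """
--     result = ""
--     index = 0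
--     original_length = len(original)
--     # Note: Sometimes a single accented capital letter becomes two codes
--     # when converted to lower case. In other words, length of the analyzed
--     # word is longer than the original. To avoid an 'out of range' error, when
--     # restoring capitals, the index must be compared with the original length.
--     for ch in analyzed:
--         if ch == ".":
--             result += "."
--         else:
--             if (index < original_length):
--                 result += original[index]
--             else:
--                 result += ch
--             index += 1
--     return result
-- ===== SOURCE B (Python) =====
-- def restore_capitals(original, analyzed):
--     segments = analyzed.split('.')
--     pieces = []
--     index = 0
--     for seg in segments:
--         taken = original[index:index + len(seg)]
--         pieces.append(taken + seg[len(taken):])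
--         index += len(seg)
--     return '.'.join(pieces)
-- ===== Notes on version B (the rewrite author's own statement) =====
-- stated objective: faster
-- what changed: Replaces A's per-character dot-test loop with a tokenize-then-slice pass: split the analysis on '.', copy a slice of the original for each segment (padding from the segment itself when the original is exhausted), and rejoin with '.'.
import Mathlib
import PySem

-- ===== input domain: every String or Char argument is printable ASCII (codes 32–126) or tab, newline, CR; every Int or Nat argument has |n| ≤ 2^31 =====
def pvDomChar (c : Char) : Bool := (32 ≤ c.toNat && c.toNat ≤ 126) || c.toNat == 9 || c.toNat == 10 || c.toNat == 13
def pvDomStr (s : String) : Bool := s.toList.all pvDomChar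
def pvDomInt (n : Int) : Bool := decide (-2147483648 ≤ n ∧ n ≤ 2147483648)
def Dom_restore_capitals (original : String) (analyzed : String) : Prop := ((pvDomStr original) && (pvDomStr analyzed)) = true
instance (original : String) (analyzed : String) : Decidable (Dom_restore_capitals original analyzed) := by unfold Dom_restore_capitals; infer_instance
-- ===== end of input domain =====

-- B restores the capitals by splitting the analysis on '.' and slice-copying the
-- original per segment, instead of A's per-character dot-test loop (alternative
-- decomposition, same linear cost).

-- ===== PORT A =====
-- A's for-loop over the characters of `analyzed`, carrying the running index into
-- `original`; `result += ch` becomes consing the emitted character onto the rest.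
def restoreGoA (orig : List Char) : List Char → Nat → List Char
  | [], _ => []
  | c :: rest, i =>
    if c = '.' then '.' :: restoreGoA orig rest i
    else (if i < orig.length then orig.getD i c else c) :: restoreGoA orig rest (i + 1)

def restore_capitals (original : String) (analyzed : String) : String :=
  String.ofList (restoreGoA original.toList analyzed.toList 0)

-- ===== PORT B =====
-- B's for-loop over the segments of analyzed.split('.'): slice-copy from the
-- original, pad from the segment's own tail, advance the index; then '.'-join.
def rebuildSegs (orig : List Char) : List (List Char) → Nat → List (List Char)
  | [], _ => []
  | seg :: rest, i =>
    let taken := PySem.List.slice orig (some (i : Int)) (some ((i : Int) + seg.length))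
    (taken ++ PySem.List.slice seg (some (taken.length : Int)) none) :: rebuildSegs orig rest (i + seg.length)

def restore_capitals_alt (original : String) (analyzed : String) : String :=
  String.ofList (PySem.Chars.join ['.'] (rebuildSegs original.toList (analyzed.toList.splitOn '.') 0))

-- ===== PRECONDITION & SPEC =====
def Spec_restore_capitals (original : String) (analyzed : String) (out : String) : Prop := out = restore_capitals_alt original analyzed
instance (original : String) (analyzed : String) (out : String) : Decidable (Spec_restore_capitals original analyzed out) := by unfold Spec_restore_capitals; infer_instance

-- ===== CLAIM (what is proved, stated in full; the proofs are below) =====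
def Claim_equal_restore_capitals : Prop := ∀ (original : String) (analyzed : String), Dom_restore_capitals original analyzed → Spec_restore_capitals original analyzed (restore_capitals original analyzed)

-- ===== LEMMAS AND PROOFS =====

-- A slice [i : i+n] with nonnegative Nat endpoints is take-after-drop.
lemma slice_natCast_eq {α : Type} (xs : List α) (i n : Nat) :
    PySem.List.slice xs (some (i : Int)) (some ((i : Int) + (n : Int))) = (xs.drop i).take n := by
  have h1 : ¬ ((i : Int) < 0) := by omega
  have h2 : ¬ ((i : Int) + n < 0) := by omega
  simp only [PySem.List.slice, PySem.List.clampIdx, if_neg h1, if_neg h2]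
  have h3 : ((i : Int) + n).toNat = i + n := by omega
  rw [h3, Int.toNat_natCast]
  by_cases hi : i ≤ xs.length
  · rw [Nat.min_eq_left hi]
    rw [List.take_eq_take_iff]
    simp
    omega
  · rw [Nat.min_eq_right (by omega), Nat.min_eq_right (by omega)]
    simp [List.drop_eq_nil_of_le (by omega : xs.length ≤ i)]

-- A slice [i :] with a nonnegative Nat start is drop.
lemma slice_from_natCast_eq {α : Type} (xs : List α) (i : Nat) :
    PySem.List.slice xs (some (i : Int)) none = xs.drop i := by
  have h1 : ¬ ((i : Int) < 0) := by omega
  simp only [PySem.List.slice, PySem.List.clampIdx, if_neg h1, Int.toNat_natCast]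
  by_cases hi : i ≤ xs.length
  · rw [Nat.min_eq_left hi]
    exact List.take_of_length_le (by simp)
  · rw [Nat.min_eq_right (by omega)]
    simp [List.drop_eq_nil_of_le (by omega : xs.length ≤ i)]

-- Reconstructed piece of a segment that has one more leading character:
-- A's per-character step equals extending B's slice-copy by one.
lemma piece_cons (orig q : List Char) (c : Char) (i : Nat) :
    (if i < orig.length then orig.getD i c else c) ::
      ((orig.drop (i+1)).take q.length ++ q.drop ((orig.drop (i+1)).take q.length).length)
    = (orig.drop i).take (q.length+1) ++ (c::q).drop (((orig.drop i).take (q.length+1)).length) := by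
  by_cases hi : i < orig.length
  · have hdrop : orig.drop i = orig.getD i c :: orig.drop (i + 1) := by
      rw [List.getD_eq_getElem _ _ hi]
      exact List.drop_eq_getElem_cons hi
    rw [hdrop]
    simp [if_pos hi]
  · have hd : orig.drop i = [] := List.drop_eq_nil_of_le (by omega)
    have hd1 : orig.drop (i+1) = [] := List.drop_eq_nil_of_le (by omega)
    simp [hd, hd1, if_neg hi]

-- Same, followed by an arbitrary common tail (the '.' and the rest of the join).
lemma piece_cons_tail (orig q : List Char) (c : Char) (i : Nat) (tail : List Char) :
    (if i < orig.length then orig.getD i c else c) ::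
      ((orig.drop (i+1)).take q.length ++
        (q.drop ((orig.drop (i+1)).take q.length).length ++ tail))
    = (orig.drop i).take (q.length+1) ++
        ((c::q).drop (((orig.drop i).take (q.length+1)).length) ++ tail) := by
  by_cases hi : i < orig.length
  · have hdrop : orig.drop i = orig.getD i c :: orig.drop (i + 1) := by
      rw [List.getD_eq_getElem _ _ hi]
      exact List.drop_eq_getElem_cons hi
    rw [hdrop]
    simp [if_pos hi]
  · have hd : orig.drop i = [] := List.drop_eq_nil_of_le (by omega)
    have hd1 : orig.drop (i+1) = [] := List.drop_eq_nil_of_le (by omega)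
    simp [hd, hd1, if_neg hi]

-- Core invariant: A's character loop from index i equals B's '.'-join of the
-- reconstructed segments of the split, started at the same index.
lemma restoreGoA_eq_join (orig : List Char) (cs : List Char) (i : Nat) :
    restoreGoA orig cs i =
      PySem.Chars.join ['.'] (rebuildSegs orig (cs.splitOn '.') i) := by
  induction cs generalizing i with
  | nil =>
      simp only [List.splitOn, List.splitOnP_nil, rebuildSegs, restoreGoA,
        slice_natCast_eq, slice_from_natCast_eq]
      simp [PySem.Chars.join_singleton]
  | cons c rest ih =>
      obtain ⟨q, t, hqt⟩ := List.exists_cons_of_ne_nil (List.splitOnP_ne_nil (fun x => x == '.') rest)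
      have hrw : rest.splitOn '.' = q :: t := hqt
      by_cases hc : c = '.'
      · subst hc
        have hsplit : ('.' :: rest).splitOn '.' = [] :: rest.splitOn '.' := by
          simp [List.splitOn, List.splitOnP_cons]
        rw [hsplit, hrw]
        simp only [restoreGoA, ih, hrw]
        simp only [rebuildSegs, slice_natCast_eq, slice_from_natCast_eq]
        simp [PySem.Chars.join_cons_cons]
      · have hsplit : (c :: rest).splitOn '.' = (c :: q) :: t := by
          simp only [List.splitOn, List.splitOnP_cons]
          rw [hqt]
          simp [hc]
        rw [hsplit]
        simp only [restoreGoA, if_neg hc, ih, hrw]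
        simp only [rebuildSegs, slice_natCast_eq, slice_from_natCast_eq, List.length_cons]
        have harith : i + (q.length + 1) = i + 1 + q.length := by omega
        simp only [harith]
        cases t with
        | nil =>
            simp only [rebuildSegs, PySem.Chars.join_singleton]
            exact piece_cons orig q c i
        | cons t0 ts =>
            simp only [rebuildSegs, slice_natCast_eq, slice_from_natCast_eq,
              PySem.Chars.join_cons_cons, List.append_assoc]
            exact piece_cons_tail orig q c i _

-- ===== VERDICT (by name: the statement is the Claim_ definition above) =====
theorem restore_capitals_spec : Claim_equal_restore_capitals := by
  intro original analyzed _
  unfold Spec_restore_capitals restore_capitals restore_capitals_alt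
  rw [restoreGoA_eq_join]
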